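-- pv_equiv track=rewrite | github.com/ping1979ping/comfyui-FVMtools | core/jb/wildcards.py | _find_top_level
-- ===== SOURCE A (Python) =====
-- def _find_top_level(text: str, delim: str) -> int:
--     """First index of ``delim`` at brace depth 0, or ``-1``."""
--     depth = 0
--     i = 0
--     n = len(text)
--     while i < n:
--         c = text[i]
--         if c == "{":
--             depth += 1
--         elif c == "}":
--             depth -= 1
--         elif depth == 0 and text.startswith(delim, i):
--             return i
--         i += 1
--     return -1
-- ===== SOURCE B (Python) =====
-- def _find_top_level(text: str, delim: str) -> int:
--     """First index of ``delim`` at brace depth 0, or ``-1``.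
--
--     Instead of walking char by char, jump between successive candidate
--     occurrences of ``delim`` with str.find and account for the brace
--     balance of each skipped gap with str.count.
--     """
--     n = len(text)
--     depth = 0
--     pos = 0
--     while True:
--         j = text.find(delim, pos)
--         if j == -1 or j == n:
--             return -1
--         gap = text[pos:j]
--         depth += gap.count("{") - gap.count("}")
--         c = text[j]
--         if c == "{":
--             depth += 1
--         elif c == "}":
--             depth -= 1
--         elif depth == 0:
--             return j
--         pos = j + 1
-- ===== Notes on version B (the rewrite author's own statement) =====
-- stated objective: faster
-- what changed: Replaces the per-character scan (depth update + startswith test at every index) by a loop over successive str.find candidates of delim, charging the brace balance of each skipped gap in bulk with str.count.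
import Mathlib
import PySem

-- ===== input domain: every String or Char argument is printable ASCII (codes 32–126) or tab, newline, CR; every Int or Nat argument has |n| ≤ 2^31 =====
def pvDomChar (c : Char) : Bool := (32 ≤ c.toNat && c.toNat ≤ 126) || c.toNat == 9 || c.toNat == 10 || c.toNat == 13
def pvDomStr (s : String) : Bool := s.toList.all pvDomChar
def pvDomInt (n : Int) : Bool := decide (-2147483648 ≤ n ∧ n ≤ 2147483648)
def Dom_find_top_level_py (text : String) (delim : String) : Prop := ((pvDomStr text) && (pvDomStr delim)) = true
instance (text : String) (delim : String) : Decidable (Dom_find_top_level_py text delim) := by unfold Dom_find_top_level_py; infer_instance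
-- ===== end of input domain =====

-- B replaces A's per-character scan with a jump between successive find-candidates of delim,
-- charging each skipped gap's brace balance in bulk (objective: faster in Python via C-level find/count).

-- ===== PORT A =====
-- A's `while i < n` scan over the remaining suffix of `text`, carrying depth and the index i;
-- `text.startswith(delim, i)` is startswith on the suffix (exact since 0 ≤ i ≤ len(text)).
def findTopLoopA (delim : List Char) : List Char → Int → Nat → Int
  | [], _, _ => -1
  | c :: rest, depth, i =>
    if c = '{' then findTopLoopA delim rest (depth + 1) (i + 1)
    else if c = '}' then findTopLoopA delim rest (depth - 1) (i + 1)
    else if depth = 0 ∧ PySem.Chars.startswith (c :: rest) delim = true then (i : Int)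
    else findTopLoopA delim rest depth (i + 1)

def find_top_level_py (text : String) (delim : String) : Int :=
  findTopLoopA delim.toList text.toList 0 0

-- ===== PORT B =====
-- B's `while True` loop over candidate positions; fuel only makes the recursion structural
-- (pos strictly increases and is bounded by len(text), so len(text)+1 steps always suffice).
def findTopLoopB (text delim : List Char) : Nat → Nat → Int → Int
  | 0, _, _ => -1
  | fuel + 1, pos, depth =>
    let j := PySem.Chars.findFrom text delim (pos : Int) none   -- j = text.find(delim, pos)
    if j = -1 ∨ j = (text.length : Int) then -1
    else
      let gap := PySem.Chars.slice text (some (pos : Int)) (some j)   -- text[pos:j]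
      let depth' := depth + (PySem.Chars.count gap ['{'] : Int) - (PySem.Chars.count gap ['}'] : Int)
      match text[j.toNat]? with                                  -- c = text[j] (always in range here)
      | none => -1
      | some c =>
        if c = '{' then findTopLoopB text delim fuel (j.toNat + 1) (depth' + 1)
        else if c = '}' then findTopLoopB text delim fuel (j.toNat + 1) (depth' - 1)
        else if depth' = 0 then (j.toNat : Int)
        else findTopLoopB text delim fuel (j.toNat + 1) depth'

def find_top_level_py_alt (text : String) (delim : String) : Int :=
  findTopLoopB text.toList delim.toList (text.toList.length + 1) 0 0

-- ===== PRECONDITION & SPEC =====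
def Spec_find_top_level_py (text : String) (delim : String) (out : Int) : Prop := out = find_top_level_py_alt text delim
instance (text : String) (delim : String) (out : Int) : Decidable (Spec_find_top_level_py text delim out) := by unfold Spec_find_top_level_py; infer_instance

-- ===== CLAIM (what is proved, stated in full; the proofs are below) =====
def Claim_equal_find_top_level_py : Prop := ∀ (text : String) (delim : String), Dom_find_top_level_py text delim → Spec_find_top_level_py text delim (find_top_level_py text delim)

-- ===== LEMMAS AND PROOFS =====

-- PySem.Chars.count with a single-character needle is List.count.
theorem pvCountGoSingleton (c : Char) (s : List Char) :
    ∀ (fuel acc : Nat), s.length ≤ fuel →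
      PySem.Chars.count.go [c] fuel s acc = acc + s.count c := by
  induction s with
  | nil => intro fuel acc _; cases fuel <;> simp [PySem.Chars.count.go]
  | cons h t ih =>
    intro fuel acc hfuel
    cases fuel with
    | zero => simp at hfuel
    | succ fuel =>
      rw [PySem.Chars.count.go.eq_def]
      dsimp only
      simp only [List.length_cons] at hfuel
      have hp : [c].isPrefixOf (h :: t) = (c == h) := by simp [List.isPrefixOf]
      by_cases hc : c = h
      · subst hc
        rw [hp, if_pos (by simp)]
        rw [show List.drop [c].length (c :: t) = t by simp]
        rw [ih fuel (acc + 1) (by omega)]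
        simp
        omega
      · rw [hp, if_neg (by simp [hc])]
        rw [ih fuel acc (by omega)]
        simp [Ne.symm hc]

theorem pvCountSingleton (s : List Char) (c : Char) :
    PySem.Chars.count s [c] = s.count c := by
  simp [PySem.Chars.count, pvCountGoSingleton c s s.length 0 le_rfl]

-- If delim never starts anywhere in the suffix, A's scan returns -1.
theorem loopA_none (delim : List Char) :
    ∀ (s : List Char) (depth : Int) (pos : Nat),
      (∀ i, ¬ delim <+: s.drop i) → findTopLoopA delim s depth pos = -1 := by
  intro s
  induction s with
  | nil => intro depth pos _; rfl
  | cons c t ih =>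
    intro depth pos h
    have htail : ∀ i, ¬ delim <+: t.drop i := fun i => by
      have := h (i + 1); simpa using this
    have hhead : PySem.Chars.startswith (c :: t) delim = false := by
      rw [← Bool.not_eq_true, PySem.Chars.startswith_iff]
      simpa using h 0
    unfold findTopLoopA
    split_ifs with h1 h2 h3
    · exact ih _ _ htail
    · exact ih _ _ htail
    · exact absurd h3.2 (by simp [hhead])
    · exact ih _ _ htail

-- A's scan over a gap that contains no start of delim only accumulates the brace balance.
theorem loopA_gap (delim : List Char) :
    ∀ (gap rest : List Char) (depth : Int) (pos : Nat),
      (∀ i, i < gap.length → ¬ delim <+: (gap ++ rest).drop i) →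
      findTopLoopA delim (gap ++ rest) depth pos
        = findTopLoopA delim rest (depth + (gap.count '{' : Int) - (gap.count '}' : Int)) (pos + gap.length) := by
  intro gap
  induction gap with
  | nil => intro rest depth pos _; simp
  | cons c g ih =>
    intro rest depth pos h
    have h0 : ¬ delim <+: (c :: (g ++ rest)) := by simpa using h 0 (by simp)
    have htail : ∀ i, i < g.length → ¬ delim <+: (g ++ rest).drop i := fun i hi => by
      have := h (i + 1) (by simp; omega); simpa using this
    simp only [List.cons_append]
    by_cases hc1 : c = '{'
    · subst hc1
      rw [show findTopLoopA delim ('{' :: (g ++ rest)) depth pos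
            = findTopLoopA delim (g ++ rest) (depth + 1) (pos + 1) from rfl]
      rw [ih rest (depth + 1) (pos + 1) htail]
      have e1 : depth + 1 + (g.count '{' : Int) - (g.count '}' : Int)
          = depth + ((('{' : Char) :: g).count '{' : Int) - ((('{' : Char) :: g).count '}' : Int) := by
        simp
        omega
      have e2 : pos + 1 + g.length = pos + (('{' : Char) :: g).length := by
        simp
        omega
      rw [e1, e2]
    · by_cases hc2 : c = '}'
      · subst hc2
        rw [show findTopLoopA delim ('}' :: (g ++ rest)) depth pos
              = findTopLoopA delim (g ++ rest) (depth - 1) (pos + 1) from rfl]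
        rw [ih rest (depth - 1) (pos + 1) htail]
        have e1 : depth - 1 + (g.count '{' : Int) - (g.count '}' : Int)
            = depth + ((('}' : Char) :: g).count '{' : Int) - ((('}' : Char) :: g).count '}' : Int) := by
          simp
          omega
        have e2 : pos + 1 + g.length = pos + (('}' : Char) :: g).length := by
          simp
          omega
        rw [e1, e2]
      · have hsw : PySem.Chars.startswith (c :: (g ++ rest)) delim = false := by
          rw [← Bool.not_eq_true, PySem.Chars.startswith_iff]; exact h0
        rw [show findTopLoopA delim (c :: (g ++ rest)) depth pos
              = if c = '{' then findTopLoopA delim (g ++ rest) (depth + 1) (pos + 1)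
                else if c = '}' then findTopLoopA delim (g ++ rest) (depth - 1) (pos + 1)
                else if depth = 0 ∧ PySem.Chars.startswith (c :: (g ++ rest)) delim = true then (pos : Int)
                else findTopLoopA delim (g ++ rest) depth (pos + 1) from rfl]
        rw [if_neg hc1, if_neg hc2, if_neg (by simp [hsw])]
        rw [ih rest depth (pos + 1) htail]
        have e1 : depth + (g.count '{' : Int) - (g.count '}' : Int)
            = depth + ((c :: g).count '{' : Int) - ((c :: g).count '}' : Int) := by
          simp [hc1, hc2]
        have e2 : pos + 1 + g.length = pos + (c :: g).length := by
          simp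
          omega
        rw [e1, e2]

-- Main loop correspondence.
theorem loopB_eq_loopA (text delim : List Char) :
    ∀ (fuel pos : Nat) (depth : Int), pos ≤ text.length → text.length - pos < fuel →
      findTopLoopB text delim fuel pos depth = findTopLoopA delim (text.drop pos) depth pos := by
  intro fuel
  induction fuel with
  | zero => intro pos depth _ hf; omega
  | succ fuel ih =>
    intro pos depth hpos hfuel
    rw [show findTopLoopB text delim (fuel + 1) pos depth
          = (let j := PySem.Chars.findFrom text delim (pos : Int) none;
             if j = -1 ∨ j = (text.length : Int) then -1
             else
               let gap := PySem.Chars.slice text (some (pos : Int)) (some j)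
               let depth' := depth + (PySem.Chars.count gap ['{'] : Int) - (PySem.Chars.count gap ['}'] : Int)
               match text[j.toNat]? with
               | none => -1
               | some c =>
                 if c = '{' then findTopLoopB text delim fuel (j.toNat + 1) (depth' + 1)
                 else if c = '}' then findTopLoopB text delim fuel (j.toNat + 1) (depth' - 1)
                 else if depth' = 0 then (j.toNat : Int)
                 else findTopLoopB text delim fuel (j.toNat + 1) depth') from rfl]
    simp only []
    rw [PySem.Chars.findFrom_natCast text delim pos hpos]
    by_cases hfneg : PySem.Chars.find (text.drop pos) delim = -1
    · rw [if_pos (by simp [hfneg])]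
      have hnoinf : ¬ delim <:+: text.drop pos := (PySem.Chars.find_eq_neg_one_iff _ _).mp hfneg
      refine (loopA_none delim _ depth pos ?_).symm
      intro i hpre
      exact hnoinf (hpre.isInfix.trans (List.drop_suffix i _).isInfix)
    · rw [if_neg hfneg]
      set f := PySem.Chars.find (text.drop pos) delim with hfdef
      have hf0 : 0 ≤ f := by
        have := PySem.Chars.neg_one_le_find (text.drop pos) delim
        rw [← hfdef] at this; omega
      obtain ⟨hpre, hmin⟩ := PySem.Chars.find_spec (s := text.drop pos) (sub := delim) hf0
      have hflen : f ≤ ((text.drop pos).length : Int) := by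
        have := PySem.Chars.find_le_length (text.drop pos) delim
        rw [← hfdef] at this; exact this
      by_cases hend : pos = text.length
      · -- suffix empty: delim must be empty, f = 0, j = len → both -1
        have hdropnil : text.drop pos = [] := by
          apply List.drop_eq_nil_of_le; omega
        have h2 : delim <+: ([] : List Char) := by
          have h3 := hpre
          rw [hdropnil, List.drop_nil] at h3
          exact h3
        have hdelim : delim = [] := List.prefix_nil.mp h2
        have hf : f = 0 := by
          rw [hfdef, hdropnil, hdelim, PySem.Chars.find_nil]
        rw [if_pos (by right; rw [hf]; omega)]
        rw [hdropnil]
        rfl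
      · -- suffix nonempty: f points inside it
        have hposlt : pos < text.length := by omega
        have hfnlt : f.toNat < (text.drop pos).length := by
          by_cases hd : delim = []
          · have hz : f = 0 := by rw [hfdef, hd, PySem.Chars.find_nil]
            rw [hz]
            simp
            omega
          · have hne : (text.drop pos).drop f.toNat ≠ [] := by
              intro hnil
              rw [hnil] at hpre
              exact hd (List.prefix_nil.mp hpre)
            have hgt : ¬ (text.drop pos).length ≤ f.toNat := fun hle => hne (List.drop_eq_nil_of_le hle)
            omega
        have hl : (text.drop pos).length = text.length - pos := List.length_drop
        have hjlen : (pos : Int) + f ≠ (text.length : Int) := by omega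
        have hjn : ((pos : Int) + f).toNat = pos + f.toNat := by omega
        have hjnlt : pos + f.toNat < text.length := by omega
        -- the character at j
        have hdrops : (text.drop pos).drop f.toNat = text.drop (pos + f.toNat) := by
          rw [List.drop_drop]
        have htailne : text.drop (pos + f.toNat) ≠ [] := by
          intro hnil
          have := List.drop_eq_nil_iff.mp hnil
          omega
        obtain ⟨c, rest', hcr⟩ := List.exists_cons_of_ne_nil htailne
        have hget : text[(pos + f.toNat)]? = some c := by
          have h0 : (List.drop (pos + f.toNat) text)[0]? = some c := by rw [hcr]; rfl
          rw [List.getElem?_drop] at h0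
          simpa using h0
        -- the gap
        have hgap : PySem.Chars.slice text (some (pos : Int)) (some ((pos : Int) + f))
            = (text.drop pos).take f.toNat := by
          have hfc : ((pos : Int) + f) = ((pos + f.toNat : Nat) : Int) := by omega
          rw [hfc, PySem.Chars.slice_eq_listSlice, PySem.List.slice_natCast]
          congr 1
          omega
        rw [if_neg (by push Not; exact ⟨by omega, hjlen⟩), hgap, hjn, hget]
        dsimp only
        rw [pvCountSingleton, pvCountSingleton]
        set depth' := depth + (((text.drop pos).take f.toNat).count '{' : Int)
                            - (((text.drop pos).take f.toNat).count '}' : Int) with hd'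
        have hsplit : text.drop pos = (text.drop pos).take f.toNat ++ (c :: rest') := by
          rw [← hcr, ← hdrops, List.take_append_drop]
        have hlen : ((text.drop pos).take f.toNat).length = f.toNat := by
          simp
          omega
        have hA : findTopLoopA delim (text.drop pos) depth pos
            = findTopLoopA delim (c :: rest') depth' (pos + f.toNat) := by
          conv_lhs => rw [hsplit]
          rw [loopA_gap delim _ _ depth pos ?_, hlen]
          intro i hi
          rw [hlen] at hi
          rw [← hsplit]
          exact hmin i hi
        rw [hA]
        have hsw : PySem.Chars.startswith (c :: rest') delim = true := by
          rw [PySem.Chars.startswith_iff, ← hcr, ← hdrops]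
          exact hpre
        have hrest : rest' = text.drop (pos + f.toNat + 1) := by
          have ht : (text.drop (pos + f.toNat)).tail = text.drop (pos + f.toNat + 1) := by
            rw [List.tail_drop]
          rw [← ht, hcr]
          rfl
        by_cases hc1 : c = '{'
        · subst hc1
          rw [if_pos rfl]
          rw [show findTopLoopA delim ('{' :: rest') depth' (pos + f.toNat)
                = findTopLoopA delim rest' (depth' + 1) (pos + f.toNat + 1) from rfl]
          rw [ih (pos + f.toNat + 1) (depth' + 1) (by omega) (by omega), hrest]
        · by_cases hc2 : c = '}'
          · subst hc2
            rw [if_neg (by decide), if_pos rfl]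
            rw [show findTopLoopA delim ('}' :: rest') depth' (pos + f.toNat)
                  = findTopLoopA delim rest' (depth' - 1) (pos + f.toNat + 1) from rfl]
            rw [ih (pos + f.toNat + 1) (depth' - 1) (by omega) (by omega), hrest]
          · rw [if_neg hc1, if_neg hc2]
            rw [show findTopLoopA delim (c :: rest') depth' (pos + f.toNat)
                  = if c = '{' then findTopLoopA delim rest' (depth' + 1) (pos + f.toNat + 1)
                    else if c = '}' then findTopLoopA delim rest' (depth' - 1) (pos + f.toNat + 1)
                    else if depth' = 0 ∧ PySem.Chars.startswith (c :: rest') delim = true then ((pos + f.toNat : Nat) : Int)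
                    else findTopLoopA delim rest' depth' (pos + f.toNat + 1) from rfl]
            rw [if_neg hc1, if_neg hc2]
            by_cases hd0 : depth' = 0
            · rw [if_pos hd0, if_pos ⟨hd0, hsw⟩]
            · rw [if_neg hd0, if_neg (by rintro ⟨h1, _⟩; exact hd0 h1)]
              rw [ih (pos + f.toNat + 1) depth' (by omega) (by omega), hrest]

-- ===== VERDICT (by name: the statement is the Claim_ definition above) =====
theorem find_top_level_py_spec : Claim_equal_find_top_level_py := by
  intro text delim _
  unfold Spec_find_top_level_py find_top_level_py find_top_level_py_alt
  rw [loopB_eq_loopA text.toList delim.toList (text.toList.length + 1) 0 0 (by omega) (by omega)]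
  simp
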